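-- pv_equiv track=rewrite | github.com/YunzeLong/P4-RandomForest | scripts/gen_p4.py | gen_ctrl_flow
-- ===== SOURCE A (Python) =====
-- ctrl_flow_tmpl = '''
--             rf_tree_%d_%d.apply();
--             if (meta.last_feature != 0) {%s}'''
--
-- def gen_ctrl_flow(tree_depths):
--     p4_str = ''
--     for tree_id, depth in enumerate(tree_depths):
--         tree_str = '\n\n            /* Tree %d */%s' % (tree_id, '%s')
--         for table_id in range(0, depth):
--             tree_str = tree_str % (ctrl_flow_tmpl % (tree_id, table_id, '%s'))
--         p4_str += tree_str % ''
--         p4_str += '\n            meta.last_res = 0;'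
--     return p4_str
-- ===== SOURCE B (Python) =====
-- def gen_ctrl_flow(tree_depths):
--     parts = []
--     for tree_id, depth in enumerate(tree_depths):
--         parts.append('\n\n            /* Tree %d */' % tree_id)
--         for table_id in range(depth):
--             parts.append('\n            rf_tree_%d_%d.apply();\n            if (meta.last_feature != 0) {' % (tree_id, table_id))
--         parts.append('}' * depth)
--         parts.append('\n            meta.last_res = 0;')
--     return ''.join(parts)
-- ===== Notes on version B (the rewrite author's own statement) =====
-- stated objective: faster
-- what changed: B emits each tree as a flat list of pieces (header, one open fragment per table id, a run of depth closing braces, the footer) joined once, instead of A's repeated nested '%s' placeholder re-substitution into the growing template string.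
import Mathlib
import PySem

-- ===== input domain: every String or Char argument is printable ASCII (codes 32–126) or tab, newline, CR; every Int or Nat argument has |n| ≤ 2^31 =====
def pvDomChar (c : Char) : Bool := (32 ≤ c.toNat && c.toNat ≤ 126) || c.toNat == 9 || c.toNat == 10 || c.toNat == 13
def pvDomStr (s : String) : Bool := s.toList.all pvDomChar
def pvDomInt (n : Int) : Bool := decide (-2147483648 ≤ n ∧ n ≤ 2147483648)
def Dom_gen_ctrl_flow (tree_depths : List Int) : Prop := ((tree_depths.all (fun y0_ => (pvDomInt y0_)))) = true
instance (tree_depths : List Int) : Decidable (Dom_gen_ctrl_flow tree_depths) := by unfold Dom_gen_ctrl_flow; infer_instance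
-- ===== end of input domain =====

-- B builds each tree's text as a flat list of pieces (header, one open fragment per table, a run of
-- `depth` closing braces, the footer) joined once, instead of A's repeated nested '%s' placeholder
-- substitution; objective: faster (no quadratic string rebuilding), same output byte for byte.

-- ===== PORT A =====
-- Hand-port of Python's '%' operator for a format string whose only remaining placeholder is a
-- single '%s': replace the first '%s' occurrence with x.  Exact for every string A applies it to
-- (each contains exactly one '%s' and no '%%' escape).
def fmtAux (x acc : List Char) : List Char → List Char
  | [] => acc.reverse
  | c :: rest =>
    match rest with
    | [] => (c :: acc).reverse
    | c2 :: rest2 =>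
      if c = '%' ∧ c2 = 's' then acc.reverse ++ (x ++ rest2)
      else fmtAux x (c :: acc) (c2 :: rest2)

def fmtChars (s x : List Char) : List Char := fmtAux x [] s

def fmt1 (s x : String) : String := String.ofList (fmtChars s.toList x.toList)

-- ctrl_flow_tmpl % (tree_id, table_id, '%s'), the constant template spelled out segment by segment
def ctrl_tmpl_fmt (tree_id table_id : Int) (s : String) : String :=
  "\n            rf_tree_" ++ PySem.Int.toStr tree_id ++ "_" ++ PySem.Int.toStr table_id
    ++ ".apply();\n            if (meta.last_feature != 0) {" ++ s ++ "}"

def gen_ctrl_flow (tree_depths : List Int) : String :=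
  (PySem.List.enumerate tree_depths).foldl (fun p4_str p =>
    let tree_str : String :=
      "\n\n            /* Tree " ++ PySem.Int.toStr p.1 ++ " */" ++ "%s"
    let tree_str :=
      (PySem.List.pyRange 0 p.2 1).foldl
        (fun tree_str table_id => fmt1 tree_str (ctrl_tmpl_fmt p.1 table_id "%s")) tree_str
    p4_str ++ fmt1 tree_str "" ++ "\n            meta.last_res = 0;") ""

-- ===== PORT B =====
def gen_ctrl_flow_alt (tree_depths : List Int) : String :=
  let parts :=
    (PySem.List.enumerate tree_depths).foldl (fun parts p =>
      parts
        ++ ["\n\n            /* Tree " ++ PySem.Int.toStr p.1 ++ " */"]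
        ++ (PySem.List.pyRange 0 p.2 1).map (fun table_id =>
             "\n            rf_tree_" ++ PySem.Int.toStr p.1 ++ "_" ++ PySem.Int.toStr table_id
               ++ ".apply();\n            if (meta.last_feature != 0) {")
        ++ [String.ofList (List.replicate p.2.toNat '}')]
        ++ ["\n            meta.last_res = 0;"]) ([] : List String)
  String.join parts

-- ===== PRECONDITION & SPEC =====
def Spec_gen_ctrl_flow (tree_depths : List Int) (out : String) : Prop := out = gen_ctrl_flow_alt tree_depths
instance (tree_depths : List Int) (out : String) : Decidable (Spec_gen_ctrl_flow tree_depths out) := by unfold Spec_gen_ctrl_flow; infer_instance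

-- ===== CLAIM (what is proved, stated in full; the proofs are below) =====
def Claim_equal_gen_ctrl_flow : Prop := ∀ (tree_depths : List Int), Dom_gen_ctrl_flow tree_depths → Spec_gen_ctrl_flow tree_depths (gen_ctrl_flow tree_depths)

-- ===== LEMMAS AND PROOFS =====

theorem mem_toDigitsCore (b : Nat) :
    ∀ (f n : Nat) (ds : List Char) (c : Char),
      c ∈ Nat.toDigitsCore b f n ds → c ∈ ds ∨ ∃ d, c = Nat.digitChar d := by
  intro f
  induction f with
  | zero => intro n ds c h; exact Or.inl h
  | succ f ih =>
    intro n ds c h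
    rw [Nat.toDigitsCore] at h
    by_cases hz : n / b = 0
    · rw [if_pos hz] at h
      rcases List.mem_cons.mp h with h | h
      · exact Or.inr ⟨n % b, h⟩
      · exact Or.inl h
    · rw [if_neg hz] at h
      rcases ih (n / b) _ c h with h' | h'
      · rcases List.mem_cons.mp h' with h' | h'
        · exact Or.inr ⟨n % b, h'⟩
        · exact Or.inl h'
      · exact Or.inr h'

theorem pct_not_mem_toChars (n : Int) : '%' ∉ PySem.Int.toChars n := by
  have key : ∀ m : Nat, '%' ∉ Nat.toDigits 10 m := by
    intro m hmem
    rcases mem_toDigitsCore 10 _ _ _ _ hmem with h' | ⟨d, h'⟩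
    · simp at h'
    · have : Nat.digitChar d ≠ '%' := by
        rcases Nat.lt_or_ge d 16 with h | h
        · interval_cases d <;> decide
        · simp only [Nat.digitChar]
          repeat rw [if_neg (by omega)]
          decide
      exact this h'.symm
  unfold PySem.Int.toChars
  split_ifs with h
  · intro hmem
    rcases List.mem_cons.mp hmem with h2 | h2
    · exact absurd h2 (by decide)
    · exact key _ h2
  · exact key _

theorem fmtAux_split (a b x : List Char) (ha : '%' ∉ a) :
    ∀ acc, fmtAux x acc (a ++ '%' :: 's' :: b) = acc.reverse ++ a ++ x ++ b := by
  induction a with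
  | nil => intro acc; simp [fmtAux]
  | cons c a ih =>
    intro acc
    have hc : c ≠ '%' := fun h => ha (h ▸ List.mem_cons_self ..)
    have ha' : '%' ∉ a := fun h => ha (List.mem_cons_of_mem _ h)
    cases a with
    | nil =>
      simp only [List.nil_append, List.cons_append, fmtAux]
      rw [if_neg (by simp [hc])]
      simp
    | cons c2 a2 =>
      simp only [List.cons_append, fmtAux]
      rw [if_neg (by simp [hc])]
      have := ih ha' (c :: acc)
      simpa [List.append_assoc] using this

theorem fmtChars_split (a b x : List Char) (ha : '%' ∉ a) :
    fmtChars (a ++ '%' :: 's' :: b) x = a ++ x ++ b := by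
  simpa using fmtAux_split a b x ha []

theorem fmtChars_close (a : List Char) (k : Nat) (ha : '%' ∉ a) :
    fmtChars (a ++ '%' :: 's' :: List.replicate k '}') [] = a ++ List.replicate k '}' := by
  simp [fmtChars_split a (List.replicate k '}') [] ha]

theorem join_foldl (l : List String) (s : String) :
    l.foldl (fun r t => r ++ t) s = s ++ String.join l := by
  induction l generalizing s with
  | nil => simp [String.join]
  | cons x xs ih =>
    rw [List.foldl_cons, ih]
    have hx : String.join (x :: xs) = x ++ String.join xs := by
      rw [String.join, List.foldl_cons, ih]; simp
    rw [hx, String.append_assoc]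

theorem toList_join (l : List String) : (String.join l).toList = (l.map String.toList).flatten := by
  induction l with
  | nil => rfl
  | cons x xs ih =>
    have hx : String.join (x :: xs) = x ++ String.join xs := by
      rw [String.join, List.foldl_cons, join_foldl]; simp
    rw [hx]
    simp [ih]

theorem join_append (a b : List String) : String.join (a ++ b) = String.join a ++ String.join b := by
  rw [String.join, List.foldl_append, join_foldl, join_foldl]
  simp

-- character-level views of the fixed fragments
def hdChars (tid : Int) : List Char :=
  "\n\n            /* Tree ".toList ++ PySem.Int.toChars tid ++ " */".toList

def openChars (tid t : Int) : List Char :=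
  "\n            rf_tree_".toList ++ PySem.Int.toChars tid ++ "_".toList
    ++ PySem.Int.toChars t ++ ".apply();\n            if (meta.last_feature != 0) {".toList

theorem pct_not_mem_hdChars (tid : Int) : '%' ∉ hdChars tid := by
  intro h
  rcases List.mem_append.mp h with h | h
  · rcases List.mem_append.mp h with h | h
    · revert h; decide
    · exact pct_not_mem_toChars tid h
  · revert h; decide

theorem pct_not_mem_openChars (tid t : Int) : '%' ∉ openChars tid t := by
  intro h
  simp only [openChars, List.append_assoc, List.mem_append] at h
  rcases h with h | h | h | h | h
  · revert h; decide
  · exact pct_not_mem_toChars tid h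
  · revert h; decide
  · exact pct_not_mem_toChars t h
  · revert h; decide

theorem toList_ctrl_tmpl_fmt (tid t : Int) :
    (ctrl_tmpl_fmt tid t "%s").toList = openChars tid t ++ '%' :: 's' :: ['}'] := by
  simp [ctrl_tmpl_fmt, openChars, String.toList_append, PySem.Int.toList_toStr]

theorem inner_loop (tid : Int) (l : List Int) (a : List Char) (k : Nat) (ha : '%' ∉ a) :
    l.foldl (fun s t => fmt1 s (ctrl_tmpl_fmt tid t "%s"))
        (String.ofList (a ++ '%' :: 's' :: List.replicate k '}'))
      = String.ofList (a ++ (l.map (fun t => openChars tid t)).flatten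
          ++ '%' :: 's' :: List.replicate (k + l.length) '}') := by
  induction l generalizing a k with
  | nil => simp
  | cons t l ih =>
    have step : fmt1 (String.ofList (a ++ '%' :: 's' :: List.replicate k '}')) (ctrl_tmpl_fmt tid t "%s")
        = String.ofList ((a ++ openChars tid t) ++ '%' :: 's' :: List.replicate (k + 1) '}') := by
      unfold fmt1
      rw [String.toList_ofList, toList_ctrl_tmpl_fmt, fmtChars_split _ _ _ ha]
      congr 1
      simp [List.append_assoc, List.replicate_succ]
    have ha2 : '%' ∉ a ++ openChars tid t := by
      intro h
      rcases List.mem_append.mp h with h | h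
      · exact ha h
      · exact pct_not_mem_openChars tid t h
    rw [List.foldl_cons, step, ih _ _ ha2]
    have harith : k + 1 + l.length = k + (t :: l).length := by simp; omega
    rw [harith]
    congr 1
    simp [List.append_assoc]

theorem tree_eq (tid depth : Int) :
    fmt1
        ((PySem.List.pyRange 0 depth 1).foldl
          (fun tree_str table_id => fmt1 tree_str (ctrl_tmpl_fmt tid table_id "%s"))
          ("\n\n            /* Tree " ++ PySem.Int.toStr tid ++ " */" ++ "%s")) ""
      ++ "\n            meta.last_res = 0;"
    = String.join
        (["\n\n            /* Tree " ++ PySem.Int.toStr tid ++ " */"]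
          ++ (PySem.List.pyRange 0 depth 1).map (fun table_id =>
               "\n            rf_tree_" ++ PySem.Int.toStr tid ++ "_" ++ PySem.Int.toStr table_id
                 ++ ".apply();\n            if (meta.last_feature != 0) {")
          ++ [String.ofList (List.replicate depth.toNat '}')]
          ++ ["\n            meta.last_res = 0;"]) := by
  have hstart : ("\n\n            /* Tree " ++ PySem.Int.toStr tid ++ " */" ++ "%s" : String)
      = String.ofList (hdChars tid ++ '%' :: 's' :: List.replicate 0 '}') := by
    apply String.toList_injective
    simp [hdChars, String.toList_append, PySem.Int.toList_toStr]
  rw [hstart, inner_loop tid _ _ 0 (pct_not_mem_hdChars tid)]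
  have hfree : '%' ∉ hdChars tid ++ ((PySem.List.pyRange 0 depth 1).map (fun t => openChars tid t)).flatten := by
    intro h
    rcases List.mem_append.mp h with h | h
    · exact pct_not_mem_hdChars tid h
    · simp only [List.mem_flatten, List.mem_map] at h
      obtain ⟨_, ⟨t, _, rfl⟩, hmem⟩ := h
      exact pct_not_mem_openChars tid t hmem
  have hclose : fmt1 (String.ofList (hdChars tid ++ ((PySem.List.pyRange 0 depth 1).map (fun t => openChars tid t)).flatten
        ++ '%' :: 's' :: List.replicate (0 + (PySem.List.pyRange 0 depth 1).length) '}')) ""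
      = String.ofList ((hdChars tid ++ ((PySem.List.pyRange 0 depth 1).map (fun t => openChars tid t)).flatten)
        ++ List.replicate depth.toNat '}') := by
    unfold fmt1
    rw [String.toList_ofList]
    have h1 : hdChars tid ++ ((PySem.List.pyRange 0 depth 1).map (fun t => openChars tid t)).flatten
        ++ '%' :: 's' :: List.replicate (0 + (PySem.List.pyRange 0 depth 1).length) '}'
        = (hdChars tid ++ ((PySem.List.pyRange 0 depth 1).map (fun t => openChars tid t)).flatten)
          ++ '%' :: 's' :: List.replicate depth.toNat '}' := by
      have hlen : 0 + (PySem.List.pyRange 0 depth 1).length = depth.toNat := by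
        rw [PySem.List.length_pyRange_one]; simp
      rw [hlen]
    rw [h1]
    have h2 : ("" : String).toList = [] := rfl
    rw [h2, fmtChars_close _ _ hfree]
  rw [hclose]
  apply String.toList_injective
  rw [toList_join]
  simp only [List.map_append, List.flatten_append, List.map_cons, List.map_nil,
    List.flatten_cons, List.flatten_nil, List.map_map]
  simp only [String.toList_append, String.toList_ofList, PySem.Int.toList_toStr]
  have hopen : ((PySem.List.pyRange 0 depth 1).map
      (String.toList ∘ fun table_id =>
        "\n            rf_tree_" ++ PySem.Int.toStr tid ++ "_" ++ PySem.Int.toStr table_id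
          ++ ".apply();\n            if (meta.last_feature != 0) {"))
      = (PySem.List.pyRange 0 depth 1).map (fun t => openChars tid t) := by
    apply List.map_congr_left
    intro t _
    simp [openChars, String.toList_append, PySem.Int.toList_toStr]
  rw [hopen]
  simp [hdChars, List.append_assoc]

theorem outer (l : List (Int × Int)) (s : String) (parts : List String)
    (h : s = String.join parts) :
    l.foldl (fun p4_str p =>
        p4_str
          ++ fmt1 ((PySem.List.pyRange 0 p.2 1).foldl
              (fun tree_str table_id => fmt1 tree_str (ctrl_tmpl_fmt p.1 table_id "%s"))
              ("\n\n            /* Tree " ++ PySem.Int.toStr p.1 ++ " */" ++ "%s")) ""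
          ++ "\n            meta.last_res = 0;") s
      = String.join (l.foldl (fun parts p =>
          parts
            ++ ["\n\n            /* Tree " ++ PySem.Int.toStr p.1 ++ " */"]
            ++ (PySem.List.pyRange 0 p.2 1).map (fun table_id =>
                 "\n            rf_tree_" ++ PySem.Int.toStr p.1 ++ "_" ++ PySem.Int.toStr table_id
                   ++ ".apply();\n            if (meta.last_feature != 0) {")
            ++ [String.ofList (List.replicate p.2.toNat '}')]
            ++ ["\n            meta.last_res = 0;"]) parts) := by
  induction l generalizing s parts with
  | nil => simpa using h
  | cons p l ih =>
    rw [List.foldl_cons, List.foldl_cons]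
    apply ih
    rw [h, String.append_assoc, tree_eq p.1 p.2]
    have hp : (parts
          ++ ["\n\n            /* Tree " ++ PySem.Int.toStr p.1 ++ " */"]
          ++ (PySem.List.pyRange 0 p.2 1).map (fun table_id =>
               "\n            rf_tree_" ++ PySem.Int.toStr p.1 ++ "_" ++ PySem.Int.toStr table_id
                 ++ ".apply();\n            if (meta.last_feature != 0) {")
          ++ [String.ofList (List.replicate p.2.toNat '}')]
          ++ ["\n            meta.last_res = 0;"])
        = parts ++ (["\n\n            /* Tree " ++ PySem.Int.toStr p.1 ++ " */"]
          ++ (PySem.List.pyRange 0 p.2 1).map (fun table_id =>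
               "\n            rf_tree_" ++ PySem.Int.toStr p.1 ++ "_" ++ PySem.Int.toStr table_id
                 ++ ".apply();\n            if (meta.last_feature != 0) {")
          ++ [String.ofList (List.replicate p.2.toNat '}')]
          ++ ["\n            meta.last_res = 0;"]) := by
      simp [List.append_assoc]
    rw [hp, join_append parts]

-- ===== VERDICT (by name: the statement is the Claim_ definition above) =====
theorem gen_ctrl_flow_spec : Claim_equal_gen_ctrl_flow := by
  intro l _
  show gen_ctrl_flow l = gen_ctrl_flow_alt l
  simp only [gen_ctrl_flow, gen_ctrl_flow_alt]
  exact outer _ "" [] rfl
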